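-- pv_equiv track=rewrite | github.com/daniel-reich/ubiquitous-fiesta | wZzZ9NtugwsnQEQeM_8.py | golf_score
-- ===== SOURCE A (Python) =====
-- def golf_score(course, result):
--   s = 0
--   for i in range(0, len(course)):
--     if result[i] == "eagle":
--       s += (-2 + course[i])
--     elif result[i] == "birdie":
--       s += (-1 + course[i])
--     elif result[i] == "bogey":
--       s += (1 + course[i])
--     elif result[i] == "double-bogey":
--       s += (2 + course[i])
--     else:
--       s += course[i]
--   return s
-- ===== SOURCE B (Python) =====
-- def golf_score(course, result):
--   played = result[:len(course)]
--   counts = {}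
--   for tag in played:
--     counts[tag] = counts.get(tag, 0) + 1
--   return (sum(course)
--           - 2 * counts.get("eagle", 0)
--           - counts.get("birdie", 0)
--           + counts.get("bogey", 0)
--           + 2 * counts.get("double-bogey", 0))
-- ===== Notes on version B (the rewrite author's own statement) =====
-- stated objective: alternative
-- what changed: Instead of a per-hole accumulator with an if/elif chain, B slices the played results, builds a frequency histogram of the score names in one counting pass, and computes the total as sum(course) plus a closed-form linear combination of the four counts.
import Mathlib
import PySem

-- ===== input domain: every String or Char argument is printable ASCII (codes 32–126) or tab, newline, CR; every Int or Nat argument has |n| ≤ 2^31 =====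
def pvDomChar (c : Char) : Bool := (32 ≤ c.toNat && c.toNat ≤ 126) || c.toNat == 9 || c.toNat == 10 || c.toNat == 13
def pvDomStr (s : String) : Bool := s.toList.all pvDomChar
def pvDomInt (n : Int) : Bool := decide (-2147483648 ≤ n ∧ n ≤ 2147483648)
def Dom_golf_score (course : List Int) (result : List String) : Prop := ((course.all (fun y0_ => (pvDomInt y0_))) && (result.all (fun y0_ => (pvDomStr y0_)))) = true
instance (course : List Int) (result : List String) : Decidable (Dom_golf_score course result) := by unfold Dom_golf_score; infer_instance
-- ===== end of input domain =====

-- B replaces A's per-hole accumulator with an if/elif chain by: slice the played results,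
-- build a frequency histogram of the score names, and combine the four counts in closed form
-- (objective: alternative decomposition, same cost).

-- ===== PORT A =====
def golf_score (course : List Int) (result : List String) : Int :=
  (PySem.List.pyRange 0 (course.length : Int) 1).foldl
    (fun s i =>
      let r := PySem.List.pyGetD result i ""
      let c := PySem.List.pyGetD course i 0
      if r = "eagle" then s + (-2 + c)
      else if r = "birdie" then s + (-1 + c)
      else if r = "bogey" then s + (1 + c)
      else if r = "double-bogey" then s + (2 + c)
      else s + c) 0

-- ===== PORT B =====
def golf_score_alt (course : List Int) (result : List String) : Int :=
  let played := PySem.List.slice result none (some (course.length : Int))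
  let counts := played.foldl (fun d tag => d.insert tag (d.getD tag 0 + 1)) PySem.Dict.empty
  course.sum
    - 2 * counts.getD "eagle" 0
    - counts.getD "birdie" 0
    + counts.getD "bogey" 0
    + 2 * counts.getD "double-bogey" 0

-- ===== PRECONDITION & SPEC =====
-- Pre_ excludes exactly the inputs on which Python A raises IndexError: result shorter than course.
def Pre_golf_score (course : List Int) (result : List String) : Prop :=
  course.length ≤ result.length
instance (course : List Int) (result : List String) : Decidable (Pre_golf_score course result) := by
  unfold Pre_golf_score; infer_instance
def pvWitness_golf_score : List Int × List String := ([4, 3, 5], ["birdie", "par", "double-bogey"])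

def Spec_golf_score (course : List Int) (result : List String) (out : Int) : Prop := out = golf_score_alt course result
instance (course : List Int) (result : List String) (out : Int) : Decidable (Spec_golf_score course result out) := by unfold Spec_golf_score; infer_instance

-- ===== CLAIM (what is proved, stated in full; the proofs are below) =====
def Claim_equal_golf_score : Prop := ∀ (course : List Int) (result : List String), Dom_golf_score course result → Pre_golf_score course result → Spec_golf_score course result (golf_score course result)

-- ===== LEMMAS AND PROOFS =====

-- A's chain of adjustments, as a function (used only to state the lemmas about A)
def golfAdjFn (r : String) : Int :=
  if r = "eagle" then -2
  else if r = "birdie" then -1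
  else if r = "bogey" then 1
  else if r = "double-bogey" then 2
  else 0

-- A's loop body adds course[i] plus the adjustment, so the fold splits into a sum of a map
theorem golf_score_eq_sum (course : List Int) (result : List String) :
    golf_score course result =
      ((PySem.List.pyRange 0 (course.length : Int) 1).map
        (fun i => PySem.List.pyGetD course i 0
            + golfAdjFn (PySem.List.pyGetD result i ""))).sum := by
  unfold golf_score
  have h : ∀ (s i : Int),
      (let r := PySem.List.pyGetD result i ""
       let c := PySem.List.pyGetD course i 0
       if r = "eagle" then s + (-2 + c)
       else if r = "birdie" then s + (-1 + c)
       else if r = "bogey" then s + (1 + c)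
       else if r = "double-bogey" then s + (2 + c)
       else s + c)
      = s + (PySem.List.pyGetD course i 0
              + golfAdjFn (PySem.List.pyGetD result i "")) := by
    intro s i
    dsimp only [golfAdjFn]
    split_ifs <;> ring
  simp only [h]
  rw [PySem.List.foldl_add (l := PySem.List.pyRange 0 (course.length : Int) 1)
    (fun i => PySem.List.pyGetD course i 0 + golfAdjFn (PySem.List.pyGetD result i ""))]
  simp

-- indexing a prefix: range-indexed reads of result are exactly result.take n when n ≤ |result|
theorem map_getD_range_take {α : Type} (xs : List α) (d : α) (n : Nat) (h : n ≤ xs.length) :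
    (List.range n).map (fun k => xs.getD k d) = xs.take n := by
  apply List.ext_getElem
  · simp [h]
  · intro i h1 h2
    simp at h1 h2 ⊢
    rw [List.getElem?_eq_getElem (by omega : i < xs.length)]
    rfl

-- the sum of adjustments over any list of score names is a linear combination of four counts
theorem sum_adj_eq_counts (rs : List String) :
    (rs.map golfAdjFn).sum =
      -2 * (rs.count "eagle" : Int) - (rs.count "birdie" : Int)
        + (rs.count "bogey" : Int) + 2 * (rs.count "double-bogey" : Int) := by
  induction rs with
  | nil => simp
  | cons r rs ih =>
    simp only [List.map_cons, List.sum_cons, List.count_cons, ih, golfAdjFn]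
    split_ifs with h1 h2 h3 h4 <;> simp_all <;> ring

-- ===== VERDICT (by name: the statement is the Claim_ definition above) =====
theorem golf_score_spec : Claim_equal_golf_score := by
  intro course result _ hpre
  unfold Spec_golf_score golf_score_alt
  dsimp only
  rw [PySem.Dict.foldl_insert_getD_add_one_eq_counter, PySem.List.slice_to_natCast]
  simp only [PySem.Dict.getD_counter]
  rw [golf_score_eq_sum, PySem.List.sum_map_add_int]
  have hc := PySem.List.map_pyGetD_pyRange_zero course 0
  simp only [PySem.List.len] at hc
  rw [hc]
  have hr : (PySem.List.pyRange 0 (course.length : Int) 1).map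
      (fun i => golfAdjFn (PySem.List.pyGetD result i "")) =
      (result.take course.length).map golfAdjFn := by
    rw [PySem.List.pyRange_one]
    simp only [Int.sub_zero, Int.toNat_natCast, List.map_map]
    rw [← map_getD_range_take result "" course.length hpre, List.map_map]
    apply List.map_congr_left
    intro k _
    simp [Function.comp, PySem.List.pyGetD_natCast]
  rw [hr, sum_adj_eq_counts]
  ring
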